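-- pv_equiv track=rewrite | github.com/hnzhang/python | RecoverIPv4Address.py | is_valid_ipv4_section
-- ===== SOURCE A (Python) =====
-- def is_valid_ipv4_section(input):
--     '''
--     features of a section as ipv4
--     1. numbers in range of [0..255]
--     the following format is acceptable,
--         1,
--         255
--         03
--         030
--     '''
--     #if more than one digit, the first digit cannot be zero
--     #if len(input) > 1 and input[0] == '0':
--     #    return False
--     #every digit must be in [0..9]
--     num_0 = ord('0')
--     num_9 = ord('9')
--     for ch in input:
--         num = ord(ch)
--         if num < num_0 or num > num_9:
--             return False
--     try:
--         num = int(input)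
--         return num >= 0 and num <= 255
--     except:
--         return False
-- ===== SOURCE B (Python) =====
-- def is_valid_ipv4_section(input):
--     # Single fused pass: validate each character and build the numeric value
--     # at the same time, instead of a validation pass followed by int().
--     if not input:
--         return False
--     value = 0
--     for ch in input:
--         if ch < '0' or ch > '9':
--             return False
--         value = value * 10 + (ord(ch) - 48)
--     return value <= 255
-- ===== Notes on version B (the rewrite author's own statement) =====
-- stated objective: alternative
-- what changed: A validates all characters in one loop and then calls int() (with try/except) for a second parsing pass; B does a single fused pass that rejects a non-digit on sight and accumulates the numeric value with value*10+digit, returning value <= 255 with no exception handling.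
import Mathlib
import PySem

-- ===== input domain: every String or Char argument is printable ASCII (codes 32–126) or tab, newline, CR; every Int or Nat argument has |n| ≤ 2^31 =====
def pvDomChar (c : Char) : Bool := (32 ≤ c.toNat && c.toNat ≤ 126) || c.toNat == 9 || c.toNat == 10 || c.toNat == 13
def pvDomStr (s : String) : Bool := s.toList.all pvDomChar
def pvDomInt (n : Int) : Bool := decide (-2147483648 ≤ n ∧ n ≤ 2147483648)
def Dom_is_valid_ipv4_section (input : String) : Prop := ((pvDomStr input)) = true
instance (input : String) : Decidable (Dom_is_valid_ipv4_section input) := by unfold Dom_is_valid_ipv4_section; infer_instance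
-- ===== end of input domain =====

-- ===== PORT A =====
-- Honest line: B fuses A's two passes (digit validation loop, then int()) into one
-- accumulate-while-validating pass; equivalence of the return values is proved below.
def aDigitsOk : List Char → Bool
  | [] => true
  | ch :: rest => if ch.toNat < '0'.toNat ∨ ch.toNat > '9'.toNat then false else aDigitsOk rest

def is_valid_ipv4_section (input : String) : Bool :=
  if aDigitsOk input.toList then
    match PySem.Int.ofStr? input with
    | some num => decide (num ≥ 0) && decide (num ≤ 255)
    | none => false
  else false

-- ===== PORT B =====
def altLoop : List Char → Nat → Option Nat
  | [], value => some value
  | ch :: rest, value =>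
    if ch < '0' ∨ ch > '9' then none
    else altLoop rest (value * 10 + (ch.toNat - 48))

def is_valid_ipv4_section_alt (input : String) : Bool :=
  if input.toList.isEmpty then false
  else
    match altLoop input.toList 0 with
    | some value => decide (value ≤ 255)
    | none => false

-- ===== PRECONDITION & SPEC =====
def Spec_is_valid_ipv4_section (input : String) (out : Bool) : Prop := out = is_valid_ipv4_section_alt input
instance (input : String) (out : Bool) : Decidable (Spec_is_valid_ipv4_section input out) := by unfold Spec_is_valid_ipv4_section; infer_instance

-- ===== CLAIM (what is proved, stated in full; the proofs are below) =====
def Claim_equal_is_valid_ipv4_section : Prop := ∀ (input : String), Dom_is_valid_ipv4_section input → Spec_is_valid_ipv4_section input (is_valid_ipv4_section input)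

-- ===== LEMMAS AND PROOFS =====

def valFrom (acc : Nat) (l : List Char) : Nat :=
  l.foldl (fun a d => a * 10 + (d.toNat - '0'.toNat)) acc

lemma isIntSpace_digit {c : Char} (h : c.isDigit = true) : PySem.Int.isIntSpace c = false := by
  revert h
  unfold PySem.Int.isIntSpace Char.isDigit
  intro h
  simp at h ⊢
  rcases h with ⟨h1, h2⟩
  and_intros <;> rintro rfl <;> simp_all

lemma dropWhile_all {p : Char → Bool} : ∀ {xs : List Char}, (∀ x ∈ xs, p x = false) →
    xs.dropWhile p = xs
  | [], _ => rfl
  | c :: l, h => by simp [h c (by simp)]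

-- characterisation of `int(s)` on a nonempty all-digit character list
lemma ofChars_digits (c : Char) (l : List Char) (hc : c.isDigit = true)
    (hl : ∀ x ∈ l, x.isDigit = true) :
    PySem.Int.ofChars? (c :: l) = some ((valFrom (c.toNat - '0'.toNat) l : Nat) : Int) := by
  have hall : ∀ x ∈ (c :: l), PySem.Int.isIntSpace x = false := by
    intro x hx
    rcases List.mem_cons.1 hx with rfl | hx
    · exact isIntSpace_digit hc
    · exact isIntSpace_digit (hl x hx)
  unfold PySem.Int.ofChars?
  simp only [letFun]
  rw [dropWhile_all hall, dropWhile_all (by intro x hx; exact hall x (List.mem_reverse.1 hx)), List.reverse_reverse]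
  split
  case h_1 ds h =>
    simp only [List.cons.injEq] at h
    obtain ⟨rfl, -⟩ := h
    exact absurd hc (by decide)
  case h_2 ds h =>
    simp only [List.cons.injEq] at h
    obtain ⟨rfl, -⟩ := h
    exact absurd hc (by decide)
  case h_3 _cs hm hp =>
    simp only [Option.pure_def, Option.bind_eq_bind, Option.map_eq_some_iff]
    refine ⟨_, ?_, rfl⟩
    simp only [Option.bind_eq_some_iff]
    refine ⟨valFrom (c.toNat - '0'.toNat) l, ?_, rfl⟩
    clear hall hm hp _cs
    conv_lhs => whnf
    rw [hc]
    conv_lhs => whnf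
    simp only [zero_mul, zero_add]
    generalize c.toNat - '0'.toNat = acc
    clear hc c
    revert hl
    induction l generalizing acc with
    | nil =>
      intro _
      conv_lhs => whnf
      simp [valFrom]
    | cons d t ih =>
      intro hl
      have hd : d.isDigit = true := hl d (by simp)
      conv_lhs => whnf
      rw [hd]
      conv_lhs => whnf
      rw [show valFrom acc (d :: t) = valFrom (acc * 10 + (d.toNat - '0'.toNat)) t from rfl]
      exact ih _ (fun x hx => hl x (List.mem_cons_of_mem d hx))

lemma notDigit_iff (c : Char) : (c.toNat < '0'.toNat ∨ c.toNat > '9'.toNat) ↔ ¬ c.isDigit = true := by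
  unfold Char.isDigit
  simp only [Bool.and_eq_true, decide_eq_true_eq, not_and_or, not_le,
    UInt32.le_iff_toNat_le]
  exact Iff.rfl

lemma bCond_iff (c : Char) : (c < '0' ∨ c > '9') ↔ (c.toNat < '0'.toNat ∨ c.toNat > '9'.toNat) := by
  constructor <;> intro h <;> rcases h with h | h
  · exact Or.inl (by exact UInt32.lt_iff_toNat_lt.mp h)
  · exact Or.inr (by exact UInt32.lt_iff_toNat_lt.mp h)
  · exact Or.inl (by exact UInt32.lt_iff_toNat_lt.mpr h)
  · exact Or.inr (by exact UInt32.lt_iff_toNat_lt.mpr h)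

lemma aDigitsOk_true {cs : List Char} (h : aDigitsOk cs = true) : ∀ x ∈ cs, x.isDigit = true := by
  induction cs with
  | nil => intro x hx; cases hx
  | cons c l ih =>
    intro x hx
    unfold aDigitsOk at h
    by_cases hcond : (c.toNat < '0'.toNat ∨ c.toNat > '9'.toNat)
    · rw [if_pos hcond] at h; cases h
    · rw [if_neg hcond] at h
      rcases List.mem_cons.1 hx with rfl | hx
      · by_contra hnot
        exact hcond ((notDigit_iff x).mpr (by simpa using hnot))
      · exact ih h x hx

lemma altLoop_none {cs : List Char} (h : aDigitsOk cs = false) : ∀ v, altLoop cs v = none := by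
  induction cs with
  | nil => intro v; cases h
  | cons c l ih =>
    intro v
    unfold aDigitsOk at h
    unfold altLoop
    by_cases hcond : (c.toNat < '0'.toNat ∨ c.toNat > '9'.toNat)
    · rw [if_pos ((bCond_iff c).mpr hcond)]
    · rw [if_neg hcond] at h
      rw [if_neg (fun hb => hcond ((bCond_iff c).mp hb))]
      exact ih h _

lemma altLoop_digits : ∀ (cs : List Char), (∀ x ∈ cs, x.isDigit = true) →
    ∀ v, altLoop cs v = some (valFrom v cs) := by
  intro cs
  induction cs with
  | nil => intro _ v; simp [altLoop, valFrom]
  | cons c l ih =>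
    intro h v
    have hc : c.isDigit = true := h c (by simp)
    unfold altLoop
    rw [if_neg (fun hb => ((notDigit_iff c).mp ((bCond_iff c).mp hb)) hc)]
    rw [ih (fun x hx => h x (List.mem_cons_of_mem c hx)) _]
    rw [show valFrom v (c :: l) = valFrom (v * 10 + (c.toNat - '0'.toNat)) l from rfl]
    norm_num [show ('0').toNat = 48 from rfl]

lemma ofStr_toList (s : String) : PySem.Int.ofStr? s = PySem.Int.ofChars? s.toList := by
  rfl

-- ===== VERDICT (by name: the statement is the Claim_ definition above) =====
theorem is_valid_ipv4_section_spec : Claim_equal_is_valid_ipv4_section := by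
  intro input _
  unfold Spec_is_valid_ipv4_section
  unfold is_valid_ipv4_section is_valid_ipv4_section_alt
  by_cases h : aDigitsOk input.toList = true
  · rw [if_pos h, ofStr_toList]
    rcases hcs : input.toList with _ | ⟨c, l⟩
    · rw [show PySem.Int.ofChars? ([] : List Char) = none from by decide]
      simp
    · have hall := aDigitsOk_true (hcs ▸ h)
      have hc : c.isDigit = true := hall c (by simp)
      have hl : ∀ x ∈ l, x.isDigit = true := fun x hx => hall x (List.mem_cons_of_mem c hx)
      rw [ofChars_digits c l hc hl, altLoop_digits (c :: l) hall 0,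
        show valFrom 0 (c :: l) = valFrom (0 * 10 + (c.toNat - '0'.toNat)) l from rfl]
      simp only [zero_mul, zero_add, List.isEmpty_cons, Bool.false_eq_true, if_false]
      simp
  · rw [if_neg h]
    rcases hcs : input.toList with _ | ⟨c, l⟩
    · rw [hcs] at h
      exact absurd rfl h
    · rw [altLoop_none (Bool.not_eq_true _ ▸ (hcs ▸ h)) 0]
      simp
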